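-- pv_equiv track=rewrite | github.com/kappablanka/atelier4_theoPiacentini | Exercices_approfondis.py | radix_order_sort
-- ===== SOURCE A (Python) =====
-- def chiffre_ordre(nombre, ordre):
--     """
--     Donne le chiffre d'un certain ordre d'un nombre
--     :param nombre:
--     :type nombre:
--     :param ordre:
--     :type ordre:
--     :return:
--     :rtype:
--     """
--     return (nombre % 10 ** (ordre + 1) - nombre % 10 ** ordre) // 10 ** ordre
--
-- def radix_order_sort(list_to_sort: list, ordre: int):
--     """
--     Trie une liste à partir des chiffres d'un ordre précis
--     :param list_to_sort:
--     :type list_to_sort: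
--     :param ordre:
--     :type ordre:
--     :return:
--     :rtype:
--     """
--     liste_boite = []
--     for i in range(10):
--         liste_boite.append([])
--     liste_trie = []
--     for e in list_to_sort:
--         liste_boite[chiffre_ordre(e, ordre)].append(e)
--     for e in liste_boite:
--         liste_trie += e
--     return liste_trie
-- ===== SOURCE B (Python) =====
-- def chiffre_ordre(nombre, ordre):
--     """Donne le chiffre d'un certain ordre d'un nombre"""
--     return (nombre % 10 ** (ordre + 1) - nombre % 10 ** ordre) // 10 ** ordre
--
--
-- def radix_order_sort(list_to_sort, ordre):
--     """Trie une liste a partir des chiffres d'un ordre precis: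
--     a single stable sort keyed by the digit replaces the ten buckets."""
--     return sorted(list_to_sort, key=lambda e: chiffre_ordre(e, ordre))
-- ===== Notes on version B (the rewrite author's own statement) =====
-- stated objective: idiomatic
-- what changed: The ten-bucket scatter/gather is replaced by a single stable sort keyed by chiffre_ordre, relying on sort stability to reproduce the per-bucket order.
import Mathlib
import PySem

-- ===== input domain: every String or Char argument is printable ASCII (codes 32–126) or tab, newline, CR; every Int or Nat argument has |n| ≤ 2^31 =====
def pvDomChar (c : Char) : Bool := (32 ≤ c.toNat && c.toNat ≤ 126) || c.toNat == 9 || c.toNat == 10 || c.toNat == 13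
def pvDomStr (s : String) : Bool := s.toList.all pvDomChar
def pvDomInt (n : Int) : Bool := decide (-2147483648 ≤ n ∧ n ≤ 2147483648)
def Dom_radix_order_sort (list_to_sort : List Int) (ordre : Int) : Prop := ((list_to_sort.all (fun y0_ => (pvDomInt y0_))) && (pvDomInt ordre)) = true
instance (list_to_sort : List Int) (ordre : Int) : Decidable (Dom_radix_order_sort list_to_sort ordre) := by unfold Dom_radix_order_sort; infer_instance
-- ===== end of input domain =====

-- B replaces A's ten-bucket scatter/gather by one stable sort keyed by the same digit helper (idiomatic).


-- ===== PORT A =====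
-- shared helper (both Pythons contain it verbatim); Python's 10 ** ordre is an
-- integer power exactly when ordre ≥ 0 (guaranteed by Pre_ for nonempty lists,
-- and unused for empty ones), where it equals 10 ^ ordre.toNat.
def chiffre_ordre (nombre : Int) (ordre : Int) : Int :=
  PySem.Int.floordiv
    (PySem.Int.mod nombre (10 ^ (ordre + 1).toNat) - PySem.Int.mod nombre (10 ^ ordre.toNat))
    (10 ^ ordre.toNat)

-- liste_boite[d].append(e): in-place append at index d (under Pre_ the digit is in 0..9, in range)
def bucketPut : List (List Int) → Nat → Int → List (List Int)
  | [], _, _ => []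
  | b :: bs, 0, e => (b ++ [e]) :: bs
  | b :: bs, n + 1, e => b :: bucketPut bs n e

def radix_order_sort (list_to_sort : List Int) (ordre : Int) : List Int :=
  -- for i in range(10): liste_boite.append([])
  let liste_boite : List (List Int) := (List.range 10).foldl (fun bs _ => bs ++ [[]]) []
  -- for e in list_to_sort: liste_boite[chiffre_ordre(e, ordre)].append(e)
  let liste_boite := list_to_sort.foldl (fun bs e => bucketPut bs (chiffre_ordre e ordre).toNat e) liste_boite
  -- for e in liste_boite: liste_trie += e
  liste_boite.foldl (fun acc e => acc ++ e) []

-- ===== PORT B =====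
def radix_order_sort_alt (list_to_sort : List Int) (ordre : Int) : List Int :=
  PySem.List.sorted list_to_sort (fun e => chiffre_ordre e ordre)

-- ===== PRECONDITION & SPEC =====
-- For ordre < 0 and a nonempty list Python A raises TypeError (10 ** ordre is a float,
-- so the bucket index is a float); with an empty list A returns [] for any ordre.
def Pre_radix_order_sort (list_to_sort : List Int) (ordre : Int) : Prop :=
  0 ≤ ordre ∨ list_to_sort = []
instance (list_to_sort : List Int) (ordre : Int) : Decidable (Pre_radix_order_sort list_to_sort ordre) := by
  unfold Pre_radix_order_sort; infer_instance

def pvWitness_radix_order_sort : List Int × Int := ([170, 45, 75, -90, 802, 24, 2, 66], 1)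

def Spec_radix_order_sort (list_to_sort : List Int) (ordre : Int) (out : List Int) : Prop := out = radix_order_sort_alt list_to_sort ordre
instance (list_to_sort : List Int) (ordre : Int) (out : List Int) : Decidable (Spec_radix_order_sort list_to_sort ordre out) := by unfold Spec_radix_order_sort; infer_instance

-- ===== CLAIM (what is proved, stated in full; the proofs are below) =====
def Claim_equal_radix_order_sort : Prop := ∀ (list_to_sort : List Int) (ordre : Int), Dom_radix_order_sort list_to_sort ordre → Pre_radix_order_sort list_to_sort ordre → Spec_radix_order_sort list_to_sort ordre (radix_order_sort list_to_sort ordre)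

-- ===== LEMMAS AND PROOFS =====

-- the digit is in 0..9 when ordre ≥ 0
theorem chiffre_ordre_bounds (n o : Int) (ho : 0 ≤ o) :
    0 ≤ chiffre_ordre n o ∧ chiffre_ordre n o < 10 := by
  have hk : (o + 1).toNat = o.toNat + 1 := by omega
  set m : Int := 10 ^ o.toNat with hmdef
  have hm : 0 < m := by positivity
  have hM : (10 : Int) ^ (o + 1).toNat = m * 10 := by rw [hk, pow_succ]
  have hMpos : 0 < m * 10 := by positivity
  unfold chiffre_ordre
  rw [hM, ← hmdef, PySem.Int.mod_eq_emod_of_pos hMpos, PySem.Int.mod_eq_emod_of_pos hm,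
    PySem.Int.floordiv_eq_ediv_of_pos hm]
  set a : Int := n % (m * 10) with hadef
  have hmod : n % m = a % m := (Int.emod_emod_of_dvd n ⟨10, rfl⟩).symm
  rw [hmod, Int.emod_def, sub_sub_cancel, Int.mul_ediv_cancel_left _ (ne_of_gt hm)]
  have ha0 : 0 ≤ a := Int.emod_nonneg n (ne_of_gt hMpos)
  have ha1 : a < m * 10 := Int.emod_lt_of_pos n hMpos
  constructor
  · exact Int.ediv_nonneg ha0 (le_of_lt hm)
  · exact (Int.ediv_lt_iff_lt_mul hm).2 (by linarith)

-- insertion skips a prefix it must not precede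
theorem insertBy_append_notbefore {α : Type} (before : α → α → Bool) (x : α)
    (l1 l2 : List α) (h : ∀ y ∈ l1, before x y = false) :
    PySem.List.insertBy before x (l1 ++ l2) = l1 ++ PySem.List.insertBy before x l2 := by
  induction l1 with
  | nil => simp
  | cons a t ih =>
    simp only [List.cons_append, PySem.List.insertBy, h a (by simp)]
    simp [ih (fun y hy => h y (by simp [hy]))]

-- insertion in front of a list it must entirely precede
theorem insertBy_all_before {α : Type} (before : α → α → Bool) (x : α)
    (l : List α) (h : ∀ y ∈ l, before x y = true) :
    PySem.List.insertBy before x l = x :: l := by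
  cases l with
  | nil => rfl
  | cons a t => simp [PySem.List.insertBy, h a (by simp)]

-- stable insertion of x into a flattened family of groups with strictly increasing digits:
-- x lands at the end of its own digit's group
theorem insertBy_flatten_groups (f : Int → Int) (x : Int) (ds : List Int)
    (g : Int → List Int) (hg : ∀ d ∈ ds, ∀ e ∈ g d, f e = d)
    (hmem : f x ∈ ds) (hlt : ds.Pairwise (· < ·)) :
    PySem.List.insertBy (fun a b => decide (f a < f b)) x ((ds.map g).flatten)
      = (ds.map (fun d => if d = f x then g d ++ [x] else g d)).flatten := by
  induction ds with
  | nil => simp at hmem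
  | cons d ds ih =>
    have hdlt : ∀ d' ∈ ds, d < d' := (List.pairwise_cons.1 hlt).1
    simp only [List.map_cons, List.flatten_cons]
    by_cases hd : d = f x
    · -- x goes at the end of group d; everything after has a strictly larger digit
      rw [insertBy_append_notbefore _ _ _ _
          (fun y hy => by simp [hg d (by simp) y hy, hd])]
      rw [insertBy_all_before _ _ _ (fun y hy => by
        simp only [List.mem_flatten, List.mem_map] at hy
        obtain ⟨l, ⟨d', hd', rfl⟩, hyl⟩ := hy
        have := hg d' (by simp [hd']) y hyl
        simp [this, ← hd, hdlt d' hd'])]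
      have : ∀ d' ∈ ds, (if d' = f x then g d' ++ [x] else g d') = g d' := by
        intro d' hd'
        have := hdlt d' hd'
        simp [show d' ≠ f x by omega]
      rw [List.map_congr_left this]
      simp [hd]
    · -- x's digit lies further right; group d is skipped unchanged
      have hxmem : f x ∈ ds := by
        cases hmem with
        | head => exact absurd rfl hd
        | tail _ h => exact h
      have hdx : d < f x := hdlt _ hxmem
      rw [insertBy_append_notbefore _ _ _ _
          (fun y hy => by simp [hg d (by simp) y hy]; omega)]
      rw [ih (fun d' hd' e he => hg d' (by simp [hd']) e he) hxmem (List.pairwise_cons.1 hlt).2]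
      rw [if_neg hd]

def pvDigits : List Int := [0, 1, 2, 3, 4, 5, 6, 7, 8, 9]

-- B's stable sort is the concatenation of the digit groups in input order
theorem sortedB_eq_groups (f : Int → Int) (xs : List Int)
    (hf : ∀ e ∈ xs, 0 ≤ f e ∧ f e < 10) :
    PySem.List.sorted xs f
      = (pvDigits.map (fun d => xs.filter (fun e => f e == d))).flatten := by
  induction xs using List.reverseRecOn with
  | nil => simp [PySem.List.sorted, pvDigits]
  | append_singleton xs x ih =>
    have hx := hf x (by simp)
    have hxs : ∀ e ∈ xs, 0 ≤ f e ∧ f e < 10 := fun e he => hf e (by simp [he])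
    rw [PySem.List.sorted_eq_foldl_insertBy, List.foldl_append, ← PySem.List.sorted_eq_foldl_insertBy,
      ih hxs]
    simp only [List.foldl_cons, List.foldl_nil]
    rw [insertBy_flatten_groups f x pvDigits _
      (by intro d _ e he; simpa using (List.mem_filter.1 he).2)
      (by simp [pvDigits]; omega) (by decide)]
    apply congrArg
    apply List.map_congr_left
    intro d _
    by_cases hd : d = f x
    · simp [List.filter_append, hd]
    · simp [List.filter_append, hd, show ¬ (f x == d) = true by simpa using Ne.symm hd]

-- A's bucket loop produces exactly those digit groups
theorem bucketsA_eq_groups (f : Int → Int) (xs : List Int)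
    (hf : ∀ e ∈ xs, 0 ≤ f e ∧ f e < 10) :
    xs.foldl (fun bs e => bucketPut bs (f e).toNat e)
        ((List.range 10).foldl (fun bs _ => bs ++ [[]]) [])
      = pvDigits.map (fun d => xs.filter (fun e => f e == d)) := by
  induction xs using List.reverseRecOn with
  | nil => simp [pvDigits, List.range_succ]
  | append_singleton xs x ih =>
    have hx := hf x (by simp)
    rw [List.foldl_append, ih (fun e he => hf e (by simp [he]))]
    simp only [List.foldl_cons, List.foldl_nil]
    have hcase : f x = 0 ∨ f x = 1 ∨ f x = 2 ∨ f x = 3 ∨ f x = 4 ∨ f x = 5 ∨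
        f x = 6 ∨ f x = 7 ∨ f x = 8 ∨ f x = 9 := by omega
    rcases hcase with h | h | h | h | h | h | h | h | h | h <;>
      simp [pvDigits, bucketPut, List.filter_append, h]

-- ===== VERDICT (by name: the statement is the Claim_ definition above) =====
theorem radix_order_sort_spec : Claim_equal_radix_order_sort := by
  intro xs o hdom hpre
  by_cases ho : 0 ≤ o
  · have hf : ∀ e ∈ xs, 0 ≤ chiffre_ordre e o ∧ chiffre_ordre e o < 10 :=
      fun e _ => chiffre_ordre_bounds e o ho
    unfold Spec_radix_order_sort radix_order_sort radix_order_sort_alt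
    simp only []
    rw [bucketsA_eq_groups (fun e => chiffre_ordre e o) xs hf,
      sortedB_eq_groups (fun e => chiffre_ordre e o) xs hf,
      PySem.List.foldl_append_eq_flatMap (fun l => l)]
    simp [List.flatMap_id']
  · have hxs : xs = [] := by
      cases hpre with
      | inl h => exact absurd h ho
      | inr h => exact h
    subst hxs
    rfl
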